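-- pv_equiv track=rewrite | github.com/asarlija/bioinformatics-algorithms | BA5E.py | moves_to_string
-- ===== SOURCE A (Python) =====
-- def moves_to_string(first,second,moves):
--     pointer_1=0
--     pointer_2=0
--     v1=[]
--     v2=[]
--
--     for move in moves:
--         if move=="D": #insert "-" on second, first the same
--             v1.append(first[pointer_1])
--             pointer_1+=1
--             v2.append("-")
--         elif move=="R":
--             v1.append("-")
--             v2.append(second[pointer_2])
--             pointer_2+=1
--         else:
--             v1.append(first[pointer_1])
--             pointer_1+=1
--             v2.append(second[pointer_2])
--             pointer_2+=1
--     return "".join(v1),"".join(v2)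
-- ===== SOURCE B (Python) =====
-- def moves_to_string(first, second, moves):
--     # Two independent passes: build the aligned first string, then the aligned second string.
--     v1 = []
--     p1 = 0
--     for move in moves:
--         if move == "R":
--             v1.append("-")
--         else:
--             v1.append(first[p1])
--             p1 += 1
--     v2 = []
--     p2 = 0
--     for move in moves:
--         if move == "D":
--             v2.append("-")
--         else:
--             v2.append(second[p2])
--             p2 += 1
--     return "".join(v1), "".join(v2)
-- ===== Notes on version B (the rewrite author's own statement) =====
-- stated objective: simpler
-- what changed: Replaces the single interleaved loop with four pieces of state by two independent passes over moves, each tracking only one pointer and building one aligned string.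
import Mathlib
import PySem

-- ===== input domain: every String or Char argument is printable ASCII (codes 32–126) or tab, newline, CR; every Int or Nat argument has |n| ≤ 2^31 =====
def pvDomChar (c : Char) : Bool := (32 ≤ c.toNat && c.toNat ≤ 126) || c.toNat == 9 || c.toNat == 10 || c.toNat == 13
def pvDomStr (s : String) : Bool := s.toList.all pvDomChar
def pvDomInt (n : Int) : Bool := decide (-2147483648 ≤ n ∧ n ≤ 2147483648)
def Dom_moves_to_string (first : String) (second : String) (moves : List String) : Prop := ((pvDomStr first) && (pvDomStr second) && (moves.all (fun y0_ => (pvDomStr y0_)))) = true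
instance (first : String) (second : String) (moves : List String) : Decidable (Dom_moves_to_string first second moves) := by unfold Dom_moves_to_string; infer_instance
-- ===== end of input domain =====

-- B replaces A's single interleaved loop (four-part state) by two independent one-pointer passes (simpler).

-- ===== PORT A =====
-- loop body of A: state (pointer_1, pointer_2, v1, v2); string indexing is PySem.Str.pyGet?,
-- out-of-range (Python IndexError) inputs are excluded by Pre_ below and padded with '?' here
def stepA (first second : String) (s : Int × Int × List Char × List Char) (move : String) :
    Int × Int × List Char × List Char :=
  if move = "D" then
    (s.1 + 1, s.2.1, s.2.2.1 ++ [(PySem.Str.pyGet? first s.1).getD '?'], s.2.2.2 ++ ['-'])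
  else if move = "R" then
    (s.1, s.2.1 + 1, s.2.2.1 ++ ['-'], s.2.2.2 ++ [(PySem.Str.pyGet? second s.2.1).getD '?'])
  else
    (s.1 + 1, s.2.1 + 1, s.2.2.1 ++ [(PySem.Str.pyGet? first s.1).getD '?'],
      s.2.2.2 ++ [(PySem.Str.pyGet? second s.2.1).getD '?'])

def moves_to_string (first : String) (second : String) (moves : List String) : String × String :=
  let st := moves.foldl (stepA first second) (0, 0, [], [])
  (String.mk st.2.2.1, String.mk st.2.2.2)

-- ===== PORT B =====
def buildV1 (first : String) (moves : List String) (p1 : Int) : List Char :=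
  match moves with
  | [] => []
  | m :: rest =>
    if m = "R" then '-' :: buildV1 first rest p1
    else (PySem.Str.pyGet? first p1).getD '?' :: buildV1 first rest (p1 + 1)

def buildV2 (second : String) (moves : List String) (p2 : Int) : List Char :=
  match moves with
  | [] => []
  | m :: rest =>
    if m = "D" then '-' :: buildV2 second rest p2
    else (PySem.Str.pyGet? second p2).getD '?' :: buildV2 second rest (p2 + 1)

def moves_to_string_alt (first : String) (second : String) (moves : List String) : String × String :=
  (String.mk (buildV1 first moves 0), String.mk (buildV2 second moves 0))

-- ===== PRECONDITION & SPEC =====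
-- Pre_ excludes exactly the inputs on which Python A raises IndexError: the loop consumes one
-- character of `first` per move ≠ "R" and one of `second` per move ≠ "D".
def Pre_moves_to_string (first : String) (second : String) (moves : List String) : Prop :=
  moves.countP (fun m => m ≠ "R") ≤ first.toList.length ∧
  moves.countP (fun m => m ≠ "D") ≤ second.toList.length
instance (first : String) (second : String) (moves : List String) : Decidable (Pre_moves_to_string first second moves) := by unfold Pre_moves_to_string; infer_instance
def pvWitness_moves_to_string : String × String × List String := ("AC", "AG", ["D", "M", "R"])

def Spec_moves_to_string (first : String) (second : String) (moves : List String) (out : String × String) : Prop := out = moves_to_string_alt first second moves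
instance (first : String) (second : String) (moves : List String) (out : String × String) : Decidable (Spec_moves_to_string first second moves out) := by unfold Spec_moves_to_string; infer_instance

-- ===== CLAIM (what is proved, stated in full; the proofs are below) =====
def Claim_equal_moves_to_string : Prop := ∀ (first : String) (second : String) (moves : List String), Dom_moves_to_string first second moves → Pre_moves_to_string first second moves → Spec_moves_to_string first second moves (moves_to_string first second moves)

-- ===== LEMMAS AND PROOFS =====
theorem fold_eq_builds (first second : String) (moves : List String)
    (p1 p2 : Int) (v1 v2 : List Char) :
    moves.foldl (stepA first second) (p1, p2, v1, v2)
    = (p1 + (moves.countP (fun m => m ≠ "R") : Int),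
       p2 + (moves.countP (fun m => m ≠ "D") : Int),
       v1 ++ buildV1 first moves p1,
       v2 ++ buildV2 second moves p2) := by
  induction moves generalizing p1 p2 v1 v2 with
  | nil => simp [buildV1, buildV2]
  | cons m rest ih =>
    rw [List.foldl_cons]
    by_cases hD : m = "D"
    · subst hD
      rw [show stepA first second (p1, p2, v1, v2) "D"
          = (p1 + 1, p2, v1 ++ [(PySem.Str.pyGet? first p1).getD '?'], v2 ++ ['-'])
          from by simp [stepA], ih]
      simp [buildV1, buildV2, List.append_assoc, Prod.ext_iff]
      omega
    · by_cases hR : m = "R"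
      · subst hR
        rw [show stepA first second (p1, p2, v1, v2) "R"
            = (p1, p2 + 1, v1 ++ ['-'], v2 ++ [(PySem.Str.pyGet? second p2).getD '?'])
            from by simp [stepA], ih]
        simp [buildV1, buildV2, List.append_assoc, Prod.ext_iff]
        omega
      · rw [show stepA first second (p1, p2, v1, v2) m
            = (p1 + 1, p2 + 1, v1 ++ [(PySem.Str.pyGet? first p1).getD '?'],
                v2 ++ [(PySem.Str.pyGet? second p2).getD '?'])
            from by simp [stepA, hD, hR], ih]
        simp [buildV1, buildV2, List.append_assoc, Prod.ext_iff, hD, hR]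
        omega

-- ===== VERDICT (by name: the statement is the Claim_ definition above) =====
theorem moves_to_string_spec : Claim_equal_moves_to_string := by
  intro first second moves _ _
  unfold Spec_moves_to_string moves_to_string moves_to_string_alt
  simp only [fold_eq_builds, List.nil_append]
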